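-- pv_equiv track=rewrite | github.com/issoft2/saas-document-asssistant | backend/LLM_Config/llm_pipeline.py | normalize_query
-- ===== SOURCE A (Python) =====
-- def normalize_query(q: str) -> str:
--     q = (q or "").strip()
--     lower = q.lower()
--     prefixes = [
--         "can you please",
--         "could you please",
--         "please",
--         "i was wondering",
--         "i would like to know",
--     ]
--     for p in prefixes:
--         if lower.startswith(p):
--             q = q[len(p) :].lstrip(" ,.")
--             break
--     return q
-- ===== SOURCE B (Python) =====
-- PHRASES = [
--     "can you please",
--     "could you please",
--     "please",
--     "i was wondering",
--     "i would like to know",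
-- ]
--
--
-- def normalize_query(q: str) -> str:
--     q = (q or "").strip()
--     # multi-pattern scan: consume q one character at a time (case-folded),
--     # keeping the list of phrase suffixes still matching; stop at the first
--     # phrase that completes.
--     rest = list(PHRASES)
--     matched = 0
--     i = 0
--     while rest and matched == 0:
--         if i >= len(q):
--             break
--         c = q[i].lower()
--         i += 1
--         rest = [r[1:] for r in rest if r and r[0] == c]
--         if "" in rest:
--             matched = i
--     if matched:
--         while matched < len(q) and q[matched] in " ,.":
--             matched += 1
--         q = q[matched:]
--     return q
-- ===== Notes on version B (the rewrite author's own statement) =====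
-- stated objective: alternative
-- what changed: Replaces the five whole-prefix startswith tests against the lowered string by a single character-at-a-time multi-pattern scan that filters a live list of phrase suffixes and stops at the first completed phrase, then skips the punctuation padding by advancing an index instead of slicing and lstrip.
import Mathlib
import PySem

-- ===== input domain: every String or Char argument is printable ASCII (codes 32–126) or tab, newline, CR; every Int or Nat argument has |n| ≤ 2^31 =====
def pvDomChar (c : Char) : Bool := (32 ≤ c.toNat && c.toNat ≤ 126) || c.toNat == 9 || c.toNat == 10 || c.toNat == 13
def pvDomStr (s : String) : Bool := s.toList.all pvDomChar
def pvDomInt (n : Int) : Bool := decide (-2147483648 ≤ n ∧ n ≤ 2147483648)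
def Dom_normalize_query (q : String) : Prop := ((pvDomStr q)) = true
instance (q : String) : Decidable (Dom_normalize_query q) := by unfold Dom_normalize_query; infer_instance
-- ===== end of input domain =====

-- B replaces the fixed prefix loop by a single case-folded multi-pattern scan over the
-- characters (alternative decomposition, same cost class).

-- ===== PORT A =====
-- `q[len(p):].lstrip(" ,.")`: lstrip with an explicit char set = dropWhile membership (exact)
def nqLstripPunct (cs : List Char) : List Char :=
  cs.dropWhile (fun c => c == ' ' || c == ',' || c == '.')

-- the `for p in prefixes: if lower.startswith(p): …; break` loop
def nqLoopA (s low : List Char) : List String → List Char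
  | [] => s
  | p :: ps =>
    if PySem.Chars.startswith low p.toList then
      nqLstripPunct (s.drop p.toList.length)
    else nqLoopA s low ps

def normalize_query (q : String) : String :=
  -- q = (q or "").strip()
  let s := PySem.Chars.strip (if q == "" then "".toList else q.toList)
  let low := PySem.Chars.lower s
  String.ofList (nqLoopA s low
    ["can you please", "could you please", "please", "i was wondering", "i would like to know"])

-- ===== PORT B =====
def nqPhrases : List (List Char) :=
  ["can you please".toList, "could you please".toList, "please".toList,
   "i was wondering".toList, "i would like to know".toList]

-- the `while rest and matched == 0` scan; returns `some i` for `matched = i`, none for matched = 0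
def nqScan : List (List Char) → List Char → Nat → Option Nat
  | cands, s, i =>
    if cands.isEmpty then none
    else
      match s with
      | [] => none
      | c :: rest =>
        let c' := PySem.Chars.lowerChar c
        let cands' := (cands.filter (fun r => !r.isEmpty && r.head! == c')).map List.tail
        if [] ∈ cands' then some (i + 1) else nqScan cands' rest (i + 1)

-- the `while matched < len(q) and q[matched] in " ,.": matched += 1` loop
-- (`c in " ,."` for a single char = membership in those three chars; exact)
def nqSkip (s : List Char) (m : Nat) : Nat :=
  if h : m < s.length then
    if s[m] == ' ' || s[m] == ',' || s[m] == '.' then nqSkip s (m + 1) else m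
  else m
termination_by s.length - m

def normalize_query_alt (q : String) : String :=
  let s := PySem.Chars.strip (if q == "" then "".toList else q.toList)
  match nqScan nqPhrases s 0 with
  | some m => String.ofList (s.drop (nqSkip s m))
  | none => String.ofList s

-- ===== PRECONDITION & SPEC =====
def Spec_normalize_query (q : String) (out : String) : Prop := out = normalize_query_alt q
instance (q : String) (out : String) : Decidable (Spec_normalize_query q out) := by unfold Spec_normalize_query; infer_instance

-- ===== CLAIM (what is proved, stated in full; the proofs are below) =====
def Claim_equal_normalize_query : Prop := ∀ (q : String), Dom_normalize_query q → Spec_normalize_query q (normalize_query q)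

-- ===== LEMMAS AND PROOFS =====

-- an antichain of candidate patterns: no one is a prefix of another
def nqAntichain (cands : List (List Char)) : Prop :=
  ∀ p ∈ cands, ∀ r ∈ cands, p <+: r → p = r

-- in an antichain at most one element is a prefix of a given list, so find? is characterized
lemma nqFind_char (cands : List (List Char)) (h : nqAntichain cands) (ls p : List Char) :
    cands.find? (fun p => decide (p <+: ls)) = some p ↔ p ∈ cands ∧ p <+: ls := by
  constructor
  · intro hf
    have hp := List.find?_some hf
    simp only [decide_eq_true_eq] at hp
    exact ⟨List.mem_of_find?_eq_some hf, hp⟩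
  · rintro ⟨hp, hpre⟩
    have hsome : (cands.find? (fun p => decide (p <+: ls))).isSome := by
      apply List.find?_isSome.2
      exact ⟨p, hp, decide_eq_true hpre⟩
    obtain ⟨r, hr⟩ := Option.isSome_iff_exists.1 hsome
    have hrmem := List.mem_of_find?_eq_some hr
    have hrpre : r <+: ls := by
      have := List.find?_some hr
      simpa using this
    have : p = r := by
      rcases List.prefix_or_prefix_of_prefix hpre hrpre with h1 | h1
      · exact h p hp r hrmem h1
      · exact (h r hrmem p hp h1).symm
    rw [hr, this]

-- membership in the filtered-and-tailed candidate list
lemma nqMem_step (cands : List (List Char)) (c' : Char) (x : List Char) :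
    x ∈ (cands.filter (fun r => !r.isEmpty && r.head! == c')).map List.tail ↔
      (c' :: x) ∈ cands := by
  constructor
  · rintro hx
    obtain ⟨r, hr, hrx⟩ := List.mem_map.1 hx
    obtain ⟨hrm, hcond⟩ := List.mem_filter.1 hr
    cases r with
    | nil => simp at hcond
    | cons a t =>
      simp only [List.head!_cons, Bool.and_eq_true, beq_iff_eq] at hcond
      subst hrx
      simpa [hcond.2] using hrm
  · intro hmem
    exact List.mem_map.2 ⟨c' :: x, List.mem_filter.2 ⟨hmem, by simp⟩, rfl⟩

lemma nqAntichain_step (cands : List (List Char)) (c' : Char) (h : nqAntichain cands) :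
    nqAntichain ((cands.filter (fun r => !r.isEmpty && r.head! == c')).map List.tail) := by
  intro p hp r hr hpr
  have hp' := (nqMem_step cands c' p).1 hp
  have hr' := (nqMem_step cands c' r).1 hr
  have h2 : (c' :: p) = (c' :: r) :=
    h _ hp' _ hr' (List.cons_prefix_cons.2 ⟨rfl, hpr⟩)
  simpa using h2

lemma nqScan_spec (s : List Char) : ∀ (cands : List (List Char)) (i : Nat),
    nqAntichain cands → (∀ p ∈ cands, p ≠ []) →
    nqScan cands s i =
      (cands.find? (fun p => decide (p <+: PySem.Chars.lower s))).map (fun p => i + p.length) := by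
  induction s with
  | nil =>
    intro cands i hac hne
    rw [nqScan]
    have : cands.find? (fun p => decide (p <+: PySem.Chars.lower [])) = none := by
      apply List.find?_eq_none.2
      intro p hp
      simp only [decide_eq_true_eq, PySem.Chars.lower, List.map_nil, List.prefix_nil]
      exact hne p hp
    rw [this]
    by_cases hc : cands.isEmpty <;> simp [hc]
  | cons c rest ih =>
    intro cands i hac hne
    rw [nqScan]
    by_cases hc : cands.isEmpty
    · rw [List.isEmpty_iff.1 hc]
      simp
    · simp only [hc]
      have hlow : PySem.Chars.lower (c :: rest) =
          PySem.Chars.lowerChar c :: PySem.Chars.lower rest := by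
        simp [PySem.Chars.lower]
      set c' := PySem.Chars.lowerChar c with hc'
      set cands' := (cands.filter (fun r => !r.isEmpty && r.head! == c')).map List.tail with hcands'
      by_cases hnilmem : ([] : List Char) ∈ cands'
      · have hmem : (c' :: ([] : List Char)) ∈ cands := (nqMem_step cands c' []).1 hnilmem
        have : cands.find? (fun p => decide (p <+: PySem.Chars.lower (c :: rest))) = some [c'] := by
          apply (nqFind_char cands hac _ _).2
          exact ⟨hmem, by rw [hlow]; exact List.cons_prefix_cons.2 ⟨rfl, List.nil_prefix⟩⟩
        simp [hnilmem, this]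
      · simp only [hnilmem, if_false]
        rw [ih cands' (i + 1) (nqAntichain_step cands c' hac) (fun p hp => by
          intro hpe; exact hnilmem (hpe ▸ hp))]
        rcases hf' : cands'.find? (fun p => decide (p <+: PySem.Chars.lower rest)) with _ | p'
        · -- no candidate survives: the original find? is none too
          have : cands.find? (fun p => decide (p <+: PySem.Chars.lower (c :: rest))) = none := by
            apply List.find?_eq_none.2
            intro p hp
            simp only [decide_eq_true_eq]
            intro hpre
            cases p with
            | nil => exact hne [] hp rfl
            | cons a t =>
              rw [hlow] at hpre
              obtain ⟨ha, ht⟩ := List.cons_prefix_cons.1 hpre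
              subst ha
              have htm : t ∈ cands' := (nqMem_step cands c' t).2 hp
              have := List.find?_eq_none.1 hf' t htm
              simp only [decide_eq_true_eq] at this
              exact this ht
          rw [this]
          simp
        · have hchar := (nqFind_char cands' (nqAntichain_step cands c' hac) _ _).1 hf'
          have : cands.find? (fun p => decide (p <+: PySem.Chars.lower (c :: rest))) =
              some (c' :: p') := by
            apply (nqFind_char cands hac _ _).2
            refine ⟨(nqMem_step cands c' p').1 hchar.1, ?_⟩
            rw [hlow]
            exact List.cons_prefix_cons.2 ⟨rfl, hchar.2⟩
          rw [this]
          simp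
          omega

lemma nqSkip_drop (s : List Char) (m : Nat) :
    s.drop (nqSkip s m) = nqLstripPunct (s.drop m) := by
  fun_induction nqSkip s m with
  | case1 m h hp ih =>
    rw [ih]
    simp only [nqLstripPunct]
    conv_rhs => rw [List.drop_eq_getElem_cons h, List.dropWhile_cons]
    simp only [hp, if_true]
  | case2 m h hp =>
    have hp' : (s[m] == ' ' || s[m] == ',' || s[m] == '.') = false := by simpa using hp
    simp only [nqLstripPunct]
    conv_rhs => rw [List.drop_eq_getElem_cons h, List.dropWhile_cons]
    simp only [hp', Bool.false_eq_true, if_false]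
    exact List.drop_eq_getElem_cons h
  | case3 m h =>
    have : s.drop m = [] := List.drop_eq_nil_of_le (by omega)
    rw [this]
    rfl

-- A's prefix loop is "find the first matching prefix, cut and lstrip"
lemma nqLoopA_find (s low : List Char) (ps : List String) :
    nqLoopA s low ps =
      match (ps.map String.toList).find? (fun p => decide (p <+: low)) with
      | some p => nqLstripPunct (s.drop p.length)
      | none => s := by
  induction ps with
  | nil => rfl
  | cons p ps ih =>
    rw [nqLoopA]
    by_cases hsw : PySem.Chars.startswith low p.toList = true
    · have hpre : (p.toList <+: low) := (PySem.Chars.startswith_iff low p.toList).1 hsw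
      rw [if_pos hsw, List.map_cons]
      simp [hpre]
    · have hpre : ¬ (p.toList <+: low) :=
        fun hpre => hsw ((PySem.Chars.startswith_iff low p.toList).2 hpre)
      rw [if_neg hsw, List.map_cons]
      simp only [List.find?_cons, decide_eq_false hpre]
      exact ih

lemma nqPhrases_antichain : nqAntichain nqPhrases := by unfold nqAntichain nqPhrases; decide

lemma nqPhrases_ne_nil : ∀ p ∈ nqPhrases, p ≠ [] := by unfold nqPhrases; decide

theorem normalize_query_spec : Claim_equal_normalize_query := by
  unfold Claim_equal_normalize_query
  intro q _
  unfold Spec_normalize_query normalize_query normalize_query_alt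
  simp only []
  set s := PySem.Chars.strip (if q == "" then "".toList else q.toList) with hs
  rw [nqScan_spec s nqPhrases 0 nqPhrases_antichain nqPhrases_ne_nil]
  rw [nqLoopA_find]
  have hmap : (["can you please", "could you please", "please", "i was wondering",
      "i would like to know"] : List String).map String.toList = nqPhrases := by rfl
  rw [hmap]
  rcases hf : nqPhrases.find? (fun p => decide (p <+: PySem.Chars.lower s)) with _ | p
  · rfl
  · simp only [Option.map_some]
    rw [nqSkip_drop]
    simp
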